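-- pv_equiv track=rewrite | github.com/vtocaciu/UMT | parola.py | secondCase
-- ===== SOURCE A (Python) =====
-- def secondCase(password, changes):
--     i = 0
--     while i < len(password) - 2:
--         if password[i] == password[i + 1] == password[i + 2]:
--             if changes['types'] != 0:
--                 changes['types'] = changes['types'] - 1
--             changes['repeatingChr'] = changes['repeatingChr'] + 1
--             i = i + 2
--         i = i + 1
--     return sum(list(changes.values()))
-- ===== SOURCE B (Python) =====
-- # B: a run-length pass counts the triples, then the per-triple counter updates
-- # are applied in one batch loop; mutates `changes` like the original.
-- def secondCase(password, changes):
--     triples = 0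
--     run = 0
--     prev = None
--     for ch in password:
--         if ch == prev:
--             run += 1
--         else:
--             triples += run // 3
--             prev = ch
--             run = 1
--     triples += run // 3
--     for _ in range(triples):
--         if changes['types'] != 0:
--             changes['types'] -= 1
--         changes['repeatingChr'] += 1
--     return sum(changes.values())
-- ===== Notes on version B (the rewrite author's own statement) =====
-- stated objective: simpler
-- what changed: Replaced A's index-jump-by-3 scan that interleaves dict mutation with matching by a run-length pass that first counts all triples (sum of run//3) and then applies the per-triple counter updates in one batch loop; Pre_ excludes assoc lists with duplicate keys (not a Python dict) and inputs where a triple makes A raise KeyError on a missing 'types'/'repeatingChr' key.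
import Mathlib
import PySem

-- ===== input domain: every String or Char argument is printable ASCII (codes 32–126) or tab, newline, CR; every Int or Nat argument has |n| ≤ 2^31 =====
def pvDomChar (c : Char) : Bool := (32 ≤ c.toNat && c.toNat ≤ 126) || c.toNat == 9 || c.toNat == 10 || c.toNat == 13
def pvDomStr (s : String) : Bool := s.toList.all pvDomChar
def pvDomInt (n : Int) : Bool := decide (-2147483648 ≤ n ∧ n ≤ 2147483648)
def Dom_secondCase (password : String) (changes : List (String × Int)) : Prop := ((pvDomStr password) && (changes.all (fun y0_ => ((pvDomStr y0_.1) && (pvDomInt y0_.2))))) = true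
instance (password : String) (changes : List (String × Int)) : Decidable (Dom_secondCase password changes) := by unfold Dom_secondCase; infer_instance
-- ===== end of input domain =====

-- B counts the triples first with a run-length pass and then applies the per-triple counter
-- updates in one batch loop (objective: simpler). A mutates `changes` in place; the Python B
-- performs the same mutation; the equivalence proved here is about the return value.

-- ===== PORT A =====
-- one iteration's dict updates (Python raises KeyError on a missing key; getD 0 stands in
-- there — Pre_ excludes those inputs whenever the loop body can run)
def pvStepA (d : PySem.Dict String Int) : PySem.Dict String Int :=
  let d1 := if d.getD "types" 0 ≠ 0 then d.insert "types" (d.getD "types" 0 - 1) else d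
  d1.insert "repeatingChr" (d1.getD "repeatingChr" 0 + 1)

-- the while loop: i advances by 1, or by 3 after a triple match
def pvLoopA : List Char → PySem.Dict String Int → PySem.Dict String Int
  | a :: b :: c :: r, d =>
      if a = b ∧ b = c then pvLoopA r (pvStepA d) else pvLoopA (b :: c :: r) d
  | _, d => d

def secondCase (password : String) (changes : List (String × Int)) : Int :=
  ((pvLoopA password.toList (PySem.Dict.mk changes)).values).foldl (· + ·) 0

-- ===== PORT B =====
-- the run-length pass of Source B: triples, prev, run
def pvRunLoop : List Char → Int → Option Char → Int → Int
  | [], triples, _, run => triples + PySem.Int.floordiv run 3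
  | ch :: rest, triples, prev, run =>
      if some ch = prev then pvRunLoop rest triples prev (run + 1)
      else pvRunLoop rest (triples + PySem.Int.floordiv run 3) (some ch) 1

-- the body of Source B's `for _ in range(triples)` loop (getD 0 stands in for the KeyError
-- lookups, as in pvStepA; Pre_ excludes the raising inputs)
def pvStepB (d : PySem.Dict String Int) : PySem.Dict String Int :=
  let d1 := if d.getD "types" 0 ≠ 0 then d.insert "types" (d.getD "types" 0 - 1) else d
  d1.insert "repeatingChr" (d1.getD "repeatingChr" 0 + 1)

def secondCase_alt (password : String) (changes : List (String × Int)) : Int :=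
  let triples := pvRunLoop password.toList 0 none 0
  let d := (PySem.List.pyRange 0 triples 1).foldl (fun d _ => pvStepB d) (PySem.Dict.mk changes)
  (d.values).foldl (· + ·) 0

-- ===== PRECONDITION & SPEC =====
-- does the password contain three equal consecutive characters (i.e. can A's loop body run)?
def pvHasTriple : List Char → Bool
  | a :: b :: c :: r => (a == b && b == c) || pvHasTriple (b :: c :: r)
  | _ => false

-- Pre_: the assoc list represents a Python dict, so its keys are distinct; and whenever the
-- password contains a triple, A looks up changes['types'] and changes['repeatingChr'], which
-- raises KeyError if either key is missing — exactly those inputs are excluded.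
def Pre_secondCase (password : String) (changes : List (String × Int)) : Prop :=
  (changes.map Prod.fst).Nodup ∧
    (pvHasTriple password.toList = true →
      ("types" ∈ changes.map Prod.fst ∧ "repeatingChr" ∈ changes.map Prod.fst))
instance (password : String) (changes : List (String × Int)) : Decidable (Pre_secondCase password changes) := by unfold Pre_secondCase; infer_instance

def pvWitness_secondCase : String × (List (String × Int)) :=
  ("aaab", [("types", 2), ("repeatingChr", 0)])

def Spec_secondCase (password : String) (changes : List (String × Int)) (out : Int) : Prop := out = secondCase_alt password changes
instance (password : String) (changes : List (String × Int)) (out : Int) : Decidable (Spec_secondCase password changes out) := by unfold Spec_secondCase; infer_instance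

-- ===== CLAIM (what is proved, stated in full; the proofs are below) =====
def Claim_equal_secondCase : Prop := ∀ (password : String) (changes : List (String × Int)), Dom_secondCase password changes → Pre_secondCase password changes → Spec_secondCase password changes (secondCase password changes)

-- ===== LEMMAS AND PROOFS =====

-- number of triples A's scan consumes
def cntA : List Char → Nat
  | a :: b :: c :: r => if a = b ∧ b = c then cntA r + 1 else cntA (b :: c :: r)
  | _ => 0

lemma loopA_eq_iterate (l : List Char) (d : PySem.Dict String Int) :
    pvLoopA l d = pvStepA^[cntA l] d := by
  fun_induction pvLoopA l d with
  | case1 a b c r d h ih =>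
    simp [cntA, h, ih, Function.iterate_succ_apply]
  | case2 a b c r d h ih =>
    simp [cntA, h, ih]
  | case3 l d h =>
    rcases l with _ | ⟨a, _ | ⟨b, _ | ⟨c, r⟩⟩⟩
    · simp [cntA]
    · simp [cntA]
    · simp [cntA]
    · exact absurd rfl (h a b c r)

lemma cntA_replicate (p : Char) (n : Nat) : cntA (List.replicate n p) = n / 3 := by
  induction n using Nat.strong_induction_on with
  | _ n ih =>
    rcases n with _ | _ | _ | m
    · simp [cntA]
    · simp [List.replicate, cntA]
    · simp [List.replicate, cntA]
    · have h3 : List.replicate (m + 3) p = p :: p :: p :: List.replicate m p := by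
        simp [List.replicate_succ]
      rw [h3, show cntA (p :: p :: p :: List.replicate m p) = cntA (List.replicate m p) + 1
        from by simp [cntA], ih m (by omega)]
      omega

lemma cntA_replicate_append (p c : Char) (h : c ≠ p) (n : Nat) (l : List Char) :
    cntA (List.replicate n p ++ c :: l) = n / 3 + cntA (c :: l) := by
  induction n using Nat.strong_induction_on with
  | _ n ih =>
    rcases n with _ | _ | _ | m
    · simp
    · cases l <;> simp [List.replicate, cntA, Ne.symm h]
    · cases l <;> simp [List.replicate, cntA, Ne.symm h]
    · have h3 : List.replicate (m + 3) p = p :: p :: p :: List.replicate m p := by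
        simp [List.replicate_succ]
      rw [h3, List.cons_append, List.cons_append, List.cons_append,
        show cntA (p :: p :: p :: (List.replicate m p ++ c :: l))
          = cntA (List.replicate m p ++ c :: l) + 1 from by simp [cntA],
        ih m (by omega)]
      omega

lemma floordiv_natCast (n : Nat) : PySem.Int.floordiv (n : Int) 3 = ((n / 3 : Nat) : Int) := by
  simp [PySem.Int.floordiv, Int.fdiv_eq_ediv]

lemma runLoop_inv (l : List Char) (p : Char) (n : Nat) (t : Int) :
    pvRunLoop l t (some p) (n : Int) = t + (cntA (List.replicate n p ++ l) : Int) := by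
  induction l generalizing p n t with
  | nil =>
    simp [pvRunLoop, cntA_replicate]
  | cons ch rest ih =>
    by_cases hc : ch = p
    · subst hc
      have hrep : List.replicate n ch ++ ch :: rest = List.replicate (n + 1) ch ++ rest := by
        rw [List.replicate_succ']
        simp
      rw [hrep]
      have hcast : ((n : Int) + 1) = ((n + 1 : Nat) : Int) := by push_cast; ring
      simp only [pvRunLoop, hcast]
      exact ih ch (n + 1) t
    · simp only [pvRunLoop, Option.some.injEq, if_neg hc]
      have h1 : pvRunLoop rest (t + PySem.Int.floordiv (n : Int) 3) (some ch) ((1 : Nat) : Int)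
          = t + PySem.Int.floordiv (n : Int) 3 + (cntA (List.replicate 1 ch ++ rest) : Int) :=
        ih ch 1 _
      simp only [Nat.cast_one] at h1
      rw [h1, cntA_replicate_append p ch hc n rest, floordiv_natCast]
      simp [List.replicate]
      ring

lemma runLoop_eq_cntA (l : List Char) : pvRunLoop l 0 none 0 = (cntA l : Int) := by
  cases l with
  | nil => simp [pvRunLoop, cntA, PySem.Int.floordiv]
  | cons ch rest =>
    simp only [pvRunLoop, if_neg (by simp : ¬ some ch = none)]
    have h1 : pvRunLoop rest (0 + PySem.Int.floordiv ((0:Nat) : Int) 3) (some ch) ((1 : Nat) : Int)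
        = 0 + PySem.Int.floordiv ((0:Nat) : Int) 3 + (cntA (List.replicate 1 ch ++ rest) : Int) :=
      runLoop_inv rest ch 1 _
    have h2 : PySem.Int.floordiv ((0:Nat) : Int) 3 = 0 := by decide
    rw [h2] at h1
    simp only [Nat.cast_one, add_zero, zero_add] at h1 ⊢
    simpa [List.replicate] using h1

-- a foldl whose body ignores the element is an iterate over the list's length
lemma foldl_const_iterate {α β : Type} (f : β → β) (l : List α) (d : β) :
    l.foldl (fun d _ => f d) d = f^[l.length] d := by
  induction l generalizing d with
  | nil => simp
  | cons x xs ih => simp [List.foldl, ih, Function.iterate_succ_apply]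

-- ===== VERDICT (by name: the statement is the Claim_ definition above) =====
theorem secondCase_spec : Claim_equal_secondCase := by
  intro password changes _ _
  unfold Spec_secondCase secondCase secondCase_alt
  rw [loopA_eq_iterate, runLoop_eq_cntA]
  simp only [foldl_const_iterate, PySem.List.length_pyRange_one]
  have hlen : ((cntA password.toList : Int) - 0).toNat = cntA password.toList := by omega
  rw [hlen]
  rfl
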